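-- pv_equiv track=rewrite | github.com/gatiflow/gatiflow-intelligence-backend | generator.py | generate_seniority_distribution
-- ===== SOURCE A (Python) =====
-- from typing import Dict, Any, List
--
-- def generate_seniority_distribution(talents: List[Dict[str, Any]]) -> Dict[str, int]:
--     distribution = {
--         "leadership_90_99": 0,
--         "senior_80_89": 0,
--         "mid_70_79": 0,
--         "junior_65_69": 0,
--     }
--
--     for talent in talents:
--         score = talent["score"]
--
--         if score >= 90:
--             distribution["leadership_90_99"] += 1
--         elif score >= 80:
--             distribution["senior_80_89"] += 1
--         elif score >= 70:
--             distribution["mid_70_79"] += 1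
--         else:
--             distribution["junior_65_69"] += 1
--
--     return distribution
-- ===== SOURCE B (Python) =====
-- from typing import Dict, Any, List
--
-- def generate_seniority_distribution(talents: List[Dict[str, Any]]) -> Dict[str, int]:
--     scores = [talent["score"] for talent in talents]
--     ge90 = sum(s >= 90 for s in scores)
--     ge80 = sum(s >= 80 for s in scores)
--     ge70 = sum(s >= 70 for s in scores)
--     return {
--         "leadership_90_99": ge90,
--         "senior_80_89": ge80 - ge90,
--         "mid_70_79": ge70 - ge80,
--         "junior_65_69": len(scores) - ge70,
--     }
-- ===== Notes on version B (the rewrite author's own statement) =====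
-- stated objective: alternative
-- what changed: Replaces the per-element if/elif cascade updating a dict with threshold-exceedance counts (ge70/ge80/ge90 computed by comprehensions/sum) whose pairwise differences give the four bands.
import Mathlib
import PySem

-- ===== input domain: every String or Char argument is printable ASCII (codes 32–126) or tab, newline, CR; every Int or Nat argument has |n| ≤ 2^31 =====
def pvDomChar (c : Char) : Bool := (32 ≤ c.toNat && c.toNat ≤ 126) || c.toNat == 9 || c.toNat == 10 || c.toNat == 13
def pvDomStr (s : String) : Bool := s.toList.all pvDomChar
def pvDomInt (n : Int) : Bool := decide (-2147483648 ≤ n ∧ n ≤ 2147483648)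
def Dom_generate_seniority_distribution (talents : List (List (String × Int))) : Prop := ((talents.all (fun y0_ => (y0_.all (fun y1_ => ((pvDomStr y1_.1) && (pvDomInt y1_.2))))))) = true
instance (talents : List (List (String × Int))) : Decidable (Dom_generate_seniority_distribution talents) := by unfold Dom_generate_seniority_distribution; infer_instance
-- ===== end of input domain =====

-- B replaces A's if/elif cascade over a dict by threshold-exceedance counts whose differences give the bands (alternative, same cost).

-- ===== PORT A =====
-- talent["score"]: total form of the dict lookup, exact under Pre_ (key present)
def pvScoreA (t : List (String × Int)) : Int := (PySem.Dict.mk t).getD "score" 0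

def pvStepA (d : PySem.Dict String Int) (t : List (String × Int)) : PySem.Dict String Int :=
  let score := pvScoreA t
  if 90 ≤ score then d.modify "leadership_90_99" 0 (· + 1)
  else if 80 ≤ score then d.modify "senior_80_89" 0 (· + 1)
  else if 70 ≤ score then d.modify "mid_70_79" 0 (· + 1)
  else d.modify "junior_65_69" 0 (· + 1)

def generate_seniority_distribution (talents : List (List (String × Int))) : List (String × Int) :=
  (talents.foldl pvStepA
    (PySem.Dict.ofList
      [("leadership_90_99", 0), ("senior_80_89", 0), ("mid_70_79", 0), ("junior_65_69", 0)])).items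

-- ===== PORT B =====
-- sum(s >= k for s in scores)
def pvCountGe (k : Int) (scores : List Int) : Int :=
  scores.foldl (fun a s => a + (if k ≤ s then 1 else 0)) 0

def generate_seniority_distribution_alt (talents : List (List (String × Int))) : List (String × Int) :=
  let scores := talents.map (fun talent => (PySem.Dict.mk talent).getD "score" 0)
  let ge90 := pvCountGe 90 scores
  let ge80 := pvCountGe 80 scores
  let ge70 := pvCountGe 70 scores
  [("leadership_90_99", ge90), ("senior_80_89", ge80 - ge90),
   ("mid_70_79", ge70 - ge80), ("junior_65_69", (scores.length : Int) - ge70)]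

-- ===== PRECONDITION & SPEC =====
-- A raises KeyError when some talent lacks the "score" key; Pre_ requires it to be present.
def Pre_generate_seniority_distribution (talents : List (List (String × Int))) : Prop :=
  ∀ t ∈ talents, "score" ∈ t.map Prod.fst
instance (talents : List (List (String × Int))) : Decidable (Pre_generate_seniority_distribution talents) := by unfold Pre_generate_seniority_distribution; infer_instance

def pvWitness_generate_seniority_distribution : (List (List (String × Int))) :=
  [[("score", 92)], [("score", 71)], [("score", 50)]]

def Spec_generate_seniority_distribution (talents : List (List (String × Int))) (out : List (String × Int)) : Prop := out = generate_seniority_distribution_alt talents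
instance (talents : List (List (String × Int))) (out : List (String × Int)) : Decidable (Spec_generate_seniority_distribution talents out) := by unfold Spec_generate_seniority_distribution; infer_instance

-- ===== CLAIM (what is proved, stated in full; the proofs are below) =====
def Claim_equal_generate_seniority_distribution : Prop := ∀ (talents : List (List (String × Int))), Dom_generate_seniority_distribution talents → Pre_generate_seniority_distribution talents → Spec_generate_seniority_distribution talents (generate_seniority_distribution talents)

-- ===== LEMMAS AND PROOFS =====

-- per-band counts of A's cascade
def pvNL : List (List (String × Int)) → Int
  | [] => 0
  | t :: ts => (if 90 ≤ pvScoreA t then 1 else 0) + pvNL ts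
def pvNS : List (List (String × Int)) → Int
  | [] => 0
  | t :: ts => (if ¬ 90 ≤ pvScoreA t ∧ 80 ≤ pvScoreA t then 1 else 0) + pvNS ts
def pvNM : List (List (String × Int)) → Int
  | [] => 0
  | t :: ts => (if ¬ 90 ≤ pvScoreA t ∧ ¬ 80 ≤ pvScoreA t ∧ 70 ≤ pvScoreA t then 1 else 0) + pvNM ts
def pvNJ : List (List (String × Int)) → Int
  | [] => 0
  | t :: ts => (if ¬ 90 ≤ pvScoreA t ∧ ¬ 80 ≤ pvScoreA t ∧ ¬ 70 ≤ pvScoreA t then 1 else 0) + pvNJ ts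

lemma foldA_char (ts : List (List (String × Int))) (a b c d : Int) :
    ts.foldl pvStepA
        (PySem.Dict.mk [("leadership_90_99", a), ("senior_80_89", b), ("mid_70_79", c), ("junior_65_69", d)]) =
      PySem.Dict.mk [("leadership_90_99", a + pvNL ts), ("senior_80_89", b + pvNS ts),
        ("mid_70_79", c + pvNM ts), ("junior_65_69", d + pvNJ ts)] := by
  induction ts generalizing a b c d with
  | nil => simp [pvNL, pvNS, pvNM, pvNJ]
  | cons t ts ih =>
    simp only [List.foldl_cons, pvStepA]
    by_cases h90 : 90 ≤ pvScoreA t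
    · simp only [h90, if_pos]
      rw [show (PySem.Dict.mk [("leadership_90_99", a), ("senior_80_89", b), ("mid_70_79", c), ("junior_65_69", d)]).modify "leadership_90_99" 0 (· + 1) = PySem.Dict.mk [("leadership_90_99", a + 1), ("senior_80_89", b), ("mid_70_79", c), ("junior_65_69", d)] by
        simp [PySem.Dict.modify, PySem.Dict.insert, PySem.Dict.getD, PySem.Dict.get?]]
      rw [ih]
      simp only [pvNL, pvNS, pvNM, pvNJ, h90, if_pos, PySem.Dict.mk.injEq]
      norm_num [add_comm, add_assoc, add_left_comm]
    · by_cases h80 : 80 ≤ pvScoreA t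
      · simp only [h90, h80, if_neg, if_pos, not_false_iff]
        rw [show (PySem.Dict.mk [("leadership_90_99", a), ("senior_80_89", b), ("mid_70_79", c), ("junior_65_69", d)]).modify "senior_80_89" 0 (· + 1) = PySem.Dict.mk [("leadership_90_99", a), ("senior_80_89", b + 1), ("mid_70_79", c), ("junior_65_69", d)] by
          simp [PySem.Dict.modify, PySem.Dict.insert, PySem.Dict.getD, PySem.Dict.get?]]
        rw [ih]
        simp only [pvNL, pvNS, pvNM, pvNJ, h90, h80, PySem.Dict.mk.injEq]
        norm_num [add_comm, add_assoc, add_left_comm]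
      · by_cases h70 : 70 ≤ pvScoreA t
        · simp only [h90, h80, h70, if_neg, if_pos, not_false_iff]
          rw [show (PySem.Dict.mk [("leadership_90_99", a), ("senior_80_89", b), ("mid_70_79", c), ("junior_65_69", d)]).modify "mid_70_79" 0 (· + 1) = PySem.Dict.mk [("leadership_90_99", a), ("senior_80_89", b), ("mid_70_79", c + 1), ("junior_65_69", d)] by
            simp [PySem.Dict.modify, PySem.Dict.insert, PySem.Dict.getD, PySem.Dict.get?]]
          rw [ih]
          simp only [pvNL, pvNS, pvNM, pvNJ, h90, h80, h70, PySem.Dict.mk.injEq]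
          norm_num [add_comm, add_assoc, add_left_comm]
        · simp only [h90, h80, h70, if_neg, not_false_iff]
          rw [show (PySem.Dict.mk [("leadership_90_99", a), ("senior_80_89", b), ("mid_70_79", c), ("junior_65_69", d)]).modify "junior_65_69" 0 (· + 1) = PySem.Dict.mk [("leadership_90_99", a), ("senior_80_89", b), ("mid_70_79", c), ("junior_65_69", d + 1)] by
            simp [PySem.Dict.modify, PySem.Dict.insert, PySem.Dict.getD, PySem.Dict.get?]]
          rw [ih]
          simp only [pvNL, pvNS, pvNM, pvNJ, h90, h80, h70, PySem.Dict.mk.injEq]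
          norm_num [add_comm, add_assoc, add_left_comm]

lemma countGe_acc (k : Int) (scores : List Int) (a : Int) :
    scores.foldl (fun a s => a + (if k ≤ s then 1 else 0)) a =
      a + scores.foldl (fun a s => a + (if k ≤ s then 1 else 0)) 0 := by
  induction scores generalizing a with
  | nil => simp
  | cons s ss ih => simp only [List.foldl_cons]; rw [ih, ih (0 + _)]; ring

lemma ge90_eq (ts : List (List (String × Int))) :
    pvCountGe 90 (ts.map (fun t => (PySem.Dict.mk t).getD "score" 0)) = pvNL ts := by
  induction ts with
  | nil => simp [pvCountGe, pvNL]
  | cons t ts ih =>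
    simp only [List.map_cons, pvCountGe, List.foldl_cons] at *
    rw [countGe_acc, ih, pvNL, pvScoreA]; ring

lemma ge80_eq (ts : List (List (String × Int))) :
    pvCountGe 80 (ts.map (fun t => (PySem.Dict.mk t).getD "score" 0)) = pvNL ts + pvNS ts := by
  induction ts with
  | nil => simp [pvCountGe, pvNL, pvNS]
  | cons t ts ih =>
    simp only [List.map_cons, pvCountGe, List.foldl_cons] at *
    rw [countGe_acc, ih, pvNL, pvNS, pvScoreA]
    by_cases h90 : (90 : Int) ≤ (PySem.Dict.mk t).getD "score" 0 <;>
      by_cases h80 : (80 : Int) ≤ (PySem.Dict.mk t).getD "score" 0 <;>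
        first
        | (exfalso; omega)
        | (simp [pvScoreA, h90, h80]; ring)
        | (simp [pvScoreA, h90, h80])

lemma ge70_eq (ts : List (List (String × Int))) :
    pvCountGe 70 (ts.map (fun t => (PySem.Dict.mk t).getD "score" 0)) = pvNL ts + pvNS ts + pvNM ts := by
  induction ts with
  | nil => simp [pvCountGe, pvNL, pvNS, pvNM]
  | cons t ts ih =>
    simp only [List.map_cons, pvCountGe, List.foldl_cons] at *
    rw [countGe_acc, ih, pvNL, pvNS, pvNM, pvScoreA]
    by_cases h90 : (90 : Int) ≤ (PySem.Dict.mk t).getD "score" 0 <;>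
      by_cases h80 : (80 : Int) ≤ (PySem.Dict.mk t).getD "score" 0 <;>
        by_cases h70 : (70 : Int) ≤ (PySem.Dict.mk t).getD "score" 0 <;>
          first
          | (exfalso; omega)
          | (simp [pvScoreA, h90, h80, h70]; ring)
          | (simp [h90, h80, h70])

lemma len_eq (ts : List (List (String × Int))) :
    (ts.length : Int) = pvNL ts + pvNS ts + pvNM ts + pvNJ ts := by
  induction ts with
  | nil => simp [pvNL, pvNS, pvNM, pvNJ]
  | cons t ts ih =>
    rw [pvNL, pvNS, pvNM, pvNJ, List.length_cons]
    push_cast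
    by_cases h90 : (90 : Int) ≤ pvScoreA t <;>
      by_cases h80 : (80 : Int) ≤ pvScoreA t <;>
        by_cases h70 : (70 : Int) ≤ pvScoreA t <;>
          simp [h90, h80, h70] <;> omega

-- ===== VERDICT (by name: the statement is the Claim_ definition above) =====
theorem generate_seniority_distribution_spec : Claim_equal_generate_seniority_distribution := by
  intro talents _ _
  unfold Spec_generate_seniority_distribution generate_seniority_distribution generate_seniority_distribution_alt
  rw [show PySem.Dict.ofList
        [("leadership_90_99", (0:Int)), ("senior_80_89", 0), ("mid_70_79", 0), ("junior_65_69", 0)] =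
      PySem.Dict.mk [("leadership_90_99", 0), ("senior_80_89", 0), ("mid_70_79", 0), ("junior_65_69", 0)] from rfl]
  rw [foldA_char]
  simp only [ge90_eq, ge80_eq, ge70_eq, List.length_map, len_eq]
  norm_num
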